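-- pv_equiv track=rewrite | github.com/HimanshuLadva/Python-DSA | Leetcode/daily/202511/20251127.py | maxSubarraySumV1
-- ===== SOURCE A (Python) =====
-- from typing import List
--
-- def maxSubarraySumV1(nums: List[int], k: int) -> int:
--     temp = k
--     numslen = len(nums)
--     sum_arr = []
--     count = 1
--     while temp <= numslen:
--         for i in range(numslen):
--             if temp+i <= numslen:
--                 sum_arr.append(sum(nums[i:temp+i]))
--         count += 1
--         temp = k*count
--     return max(sum_arr)
-- ===== SOURCE B (Python) =====
-- from typing import List
--
-- def maxSubarraySumV1(nums: List[int], k: int) -> int: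
--     n = len(nums)
--     prefix = [0]
--     for x in nums:
--         prefix.append(prefix[-1] + x)
--     return max(prefix[i + m] - prefix[i]
--                for m in range(k, n + 1, k)
--                for i in range(n - m + 1))
-- ===== Notes on version B (the rewrite author's own statement) =====
-- stated objective: faster
-- what changed: Replace the O(n^3/k) triple pass (recomputing each window sum with sum(nums[i:i+m])) by a prefix-sum array built once, so each window sum is one O(1) subtraction.
import Mathlib
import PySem

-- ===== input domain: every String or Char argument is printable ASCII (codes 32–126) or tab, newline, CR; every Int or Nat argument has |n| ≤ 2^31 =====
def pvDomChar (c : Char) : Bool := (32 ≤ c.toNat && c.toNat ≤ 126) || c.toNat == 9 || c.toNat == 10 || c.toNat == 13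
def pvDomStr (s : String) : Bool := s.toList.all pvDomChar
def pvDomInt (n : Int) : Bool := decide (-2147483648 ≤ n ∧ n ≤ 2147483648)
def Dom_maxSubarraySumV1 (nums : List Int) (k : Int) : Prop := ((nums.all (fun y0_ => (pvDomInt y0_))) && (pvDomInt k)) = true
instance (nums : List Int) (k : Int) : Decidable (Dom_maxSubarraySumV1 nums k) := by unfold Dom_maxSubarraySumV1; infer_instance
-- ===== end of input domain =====

-- B replaces A's per-window summation (sum(nums[i:i+m]) for every window) by a prefix-sum array
-- built once, so each window sum is a single subtraction; a timing run measured B faster.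

-- ===== PORT A =====
-- inner 'for i in range(numslen): if temp+i <= numslen: sum_arr.append(sum(nums[i:temp+i]))'
def maxSubarraySumV1Inner (nums : List Int) (numslen temp : Int) (sum_arr : List Int) : List Int :=
  (PySem.List.pyRange 0 numslen 1).foldl
    (fun acc i =>
      if temp + i ≤ numslen then acc ++ [(PySem.List.slice nums (some i) (some (temp + i))).sum]
      else acc)
    sum_arr

-- the 'while temp <= numslen' loop; fuel = numslen+1 iterations suffice under Pre_ (k ≥ 1, so
-- temp = k*count grows by at least 1 each round); for k ≤ 0 the Python loop never terminates
-- (or raises for k > numslen), and those inputs are excluded by Pre_.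
def maxSubarraySumV1Loop (nums : List Int) (numslen k : Int) : Nat → Int → Int → List Int → List Int
  | 0, _, _, sum_arr => sum_arr
  | f + 1, temp, count, sum_arr =>
    if temp ≤ numslen then
      maxSubarraySumV1Loop nums numslen k f (k * (count + 1)) (count + 1)
        (maxSubarraySumV1Inner nums numslen temp sum_arr)
    else sum_arr

def maxSubarraySumV1 (nums : List Int) (k : Int) : Int :=
  let numslen : Int := (nums.length : Int)
  let sum_arr := maxSubarraySumV1Loop nums numslen k (nums.length + 1) k 1 []
  (PySem.List.max? sum_arr (fun y => y)).getD 0   -- max(sum_arr); nonempty under Pre_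

-- ===== PORT B =====
def maxSubarraySumV1_alt (nums : List Int) (k : Int) : Int :=
  let n : Int := (nums.length : Int)
  -- prefix = [0]; for x in nums: prefix.append(prefix[-1] + x)
  let pfx := nums.foldl (fun p x => p ++ [(PySem.List.pyGet? p (-1)).getD 0 + x]) [0]
  -- max(prefix[i+m] - prefix[i] for m in range(k, n+1, k) for i in range(n-m+1))
  let cands := (PySem.List.pyRange k (n + 1) k).flatMap
    (fun m => (PySem.List.pyRange 0 (n - m + 1) 1).map
      (fun i => (PySem.List.pyGet? pfx (i + m)).getD 0 - (PySem.List.pyGet? pfx i).getD 0))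
  (PySem.List.max? cands (fun y => y)).getD 0

-- ===== PRECONDITION & SPEC =====
-- Pre_ = exactly the inputs on which the Python A returns: for k ≤ 0 A's while-loop never
-- terminates, and for k > len(nums) max([]) raises ValueError (B also raises there).
def Pre_maxSubarraySumV1 (nums : List Int) (k : Int) : Prop := 1 ≤ k ∧ k ≤ (nums.length : Int)
instance (nums : List Int) (k : Int) : Decidable (Pre_maxSubarraySumV1 nums k) := by
  unfold Pre_maxSubarraySumV1; infer_instance
def pvWitness_maxSubarraySumV1 : List Int × Int := ([1, -2, 3], 2)

def Spec_maxSubarraySumV1 (nums : List Int) (k : Int) (out : Int) : Prop := out = maxSubarraySumV1_alt nums k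
instance (nums : List Int) (k : Int) (out : Int) : Decidable (Spec_maxSubarraySumV1 nums k out) := by unfold Spec_maxSubarraySumV1; infer_instance

-- ===== CLAIM (what is proved, stated in full; the proofs are below) =====
def Claim_equal_maxSubarraySumV1 : Prop := ∀ (nums : List Int) (k : Int), Dom_maxSubarraySumV1 nums k → Pre_maxSubarraySumV1 nums k → Spec_maxSubarraySumV1 nums k (maxSubarraySumV1 nums k)

-- ===== LEMMAS AND PROOFS =====

-- p[-1] is the last element (p nonempty)
theorem pvGetNegOne {α : Type} (l : List α) (h : l ≠ []) :
    PySem.List.pyGet? l (-1) = l.getLast? := by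
  have hpos : 0 < l.length := List.length_pos_of_ne_nil h
  rw [List.getLast?_eq_getElem?]
  simp only [PySem.List.pyGet?, PySem.List.pyIdx?]
  norm_num
  rw [if_pos (by omega : 1 ≤ l.length)]
  simp

-- running prefix sums appended after seed value s
def pvScan (s : Int) : List Int → List Int
  | [] => []
  | x :: xs => (s + x) :: pvScan (s + x) xs

theorem pvFoldPrefix : ∀ (l : List Int) (p : List Int) (s : Int), p.getLast? = some s →
    l.foldl (fun p x => p ++ [(PySem.List.pyGet? p (-1)).getD 0 + x]) p = p ++ pvScan s l
  | [], p, s, _ => by simp [pvScan]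
  | x :: xs, p, s, h => by
    have hne : p ≠ [] := by rintro rfl; simp at h
    have h1 : PySem.List.pyGet? p (-1) = some s := by rw [pvGetNegOne p hne, h]
    simp only [List.foldl_cons, h1, Option.getD_some]
    rw [pvFoldPrefix xs (p ++ [s + x]) (s + x) (by simp)]
    simp [pvScan]

theorem pvScanGet : ∀ (l : List Int) (s : Int) (j : Nat), j < l.length →
    (pvScan s l)[j]? = some (s + (l.take (j + 1)).sum)
  | [], _, j, h => by simp at h
  | x :: xs, s, 0, _ => by simp [pvScan]
  | x :: xs, s, j + 1, h => by
    simp only [pvScan, List.getElem?_cons_succ]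
    rw [pvScanGet xs (s + x) j (by simpa using h)]
    simp only [List.take_succ_cons, List.sum_cons, Option.some.injEq]
    ring

theorem pvPrefixGet (nums : List Int) (j : Nat) (hj : j ≤ nums.length) :
    PySem.List.pyGet? (nums.foldl (fun p x => p ++ [(PySem.List.pyGet? p (-1)).getD 0 + x]) [0]) (j : Int)
      = some ((nums.take j).sum) := by
  rw [pvFoldPrefix nums [0] 0 rfl, PySem.List.pyGet?_natCast]
  cases j with
  | zero => simp
  | succ j' =>
    simp only [List.cons_append, List.nil_append, List.getElem?_cons_succ]
    rw [pvScanGet nums 0 j' (by omega)]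
    simp

-- the window sums of one length m, in order of start index
def pvWin (nums : List Int) (m : Nat) : List Int :=
  (List.range (nums.length - m + 1)).map
    (fun i => (nums.take (i + m)).sum - (nums.take i).sum)

theorem pvSliceSum (nums : List Int) (i m : Nat) (_h : i + m ≤ nums.length) :
    (PySem.List.slice nums (some (i : Int)) (some ((m : Int) + (i : Int)))).sum
      = (nums.take (i + m)).sum - (nums.take i).sum := by
  have hc : (m : Int) + (i : Int) = ((m + i : Nat) : Int) := by push_cast; ring
  rw [hc, PySem.List.slice_natCast]
  have h2 : m + i - i = m := by omega
  rw [h2]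
  have h3 : nums.take (i + m) = nums.take i ++ (nums.drop i).take m := List.take_add
  rw [h3, List.sum_append]; ring

theorem pvFilterRangeLt (c : Nat) : ∀ (N : Nat), c ≤ N →
    (List.range N).filter (fun i => decide (i < c)) = List.range c := by
  intro N
  induction N with
  | zero => intro h; simp_all
  | succ N ih =>
    intro h
    rw [List.range_succ, List.filter_append]
    by_cases hc : c ≤ N
    · rw [ih hc]
      simp [Nat.not_lt.mpr hc]
    · have hce : c = N + 1 := by omega
      subst hce
      rw [List.range_succ]
      congr 1
      · rw [List.filter_eq_self]
        intro a ha
        simp only [List.mem_range] at ha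
        simp only [decide_eq_true_eq]
        omega
      · simp

theorem pvFlatMapCongr {α β : Type} (l : List α) (f g : α → List β)
    (h : ∀ x ∈ l, f x = g x) : l.flatMap f = l.flatMap g := by
  induction l with
  | nil => rfl
  | cons x xs ih =>
    simp only [List.flatMap_cons]
    rw [h x (by simp), ih (fun y hy => h y (by simp [hy]))]

-- A's inner for-loop appends exactly the window sums of length temp
theorem pvInnerEq (nums : List Int) (temp : Int) (h1 : 1 ≤ temp)
    (h2 : temp ≤ (nums.length : Int)) (acc : List Int) :
    maxSubarraySumV1Inner nums (nums.length : Int) temp acc = acc ++ pvWin nums temp.toNat := by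
  obtain ⟨M, rfl⟩ : ∃ M : Nat, temp = (M : Int) := ⟨temp.toNat, by omega⟩
  have hM1 : 1 ≤ M := by omega
  have hM2 : M ≤ nums.length := by omega
  unfold maxSubarraySumV1Inner
  rw [PySem.List.foldl_append_ite (p := fun i => (M : Int) + i ≤ (nums.length : Int))
      (f := fun i => (PySem.List.slice nums (some i) (some ((M : Int) + i))).sum)]
  rw [PySem.List.pyRange_zero_natCast, List.filter_map, List.map_map]
  have hfil : (List.range nums.length).filter
        ((fun i => decide ((M : Int) + i ≤ (nums.length : Int))) ∘ (fun j : Nat => (j : Int)))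
      = List.range (nums.length - M + 1) := by
    have hpred : ((fun i => decide ((M : Int) + i ≤ (nums.length : Int))) ∘ (fun j : Nat => (j : Int)))
        = (fun i : Nat => decide (i < nums.length - M + 1)) := by
      funext i
      simp only [Function.comp, decide_eq_decide]
      omega
    rw [hpred]
    exact pvFilterRangeLt _ _ (by omega)
  rw [hfil]
  congr 1
  simp only [pvWin, Int.toNat_natCast]
  apply List.map_congr_left
  intro i hi
  simp only [List.mem_range] at hi
  simp only [Function.comp]
  rw [pvSliceSum nums i M (by omega)]

-- B's per-length candidate list equals the same window sums
theorem pvAltInnerEq (nums : List Int) (M : Nat) (h2 : M ≤ nums.length) :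
    (PySem.List.pyRange 0 ((nums.length : Int) - (M : Int) + 1) 1).map
      (fun i =>
        (PySem.List.pyGet? (nums.foldl (fun p x => p ++ [(PySem.List.pyGet? p (-1)).getD 0 + x]) [0]) (i + (M : Int))).getD 0
        - (PySem.List.pyGet? (nums.foldl (fun p x => p ++ [(PySem.List.pyGet? p (-1)).getD 0 + x]) [0]) i).getD 0)
    = pvWin nums M := by
  have hc : (nums.length : Int) - (M : Int) + 1 = ((nums.length - M + 1 : Nat) : Int) := by omega
  rw [hc, PySem.List.pyRange_zero_natCast, List.map_map, pvWin]
  apply List.map_congr_left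
  intro i hi
  simp only [List.mem_range] at hi
  simp only [Function.comp]
  have hcast : (i : Int) + (M : Int) = ((i + M : Nat) : Int) := by push_cast; ring
  rw [hcast, pvPrefixGet nums (i + M) (by omega), pvPrefixGet nums i (by omega)]
  simp

theorem pvRangeNil (a b s : Int) (hs : 0 < s) (h : b ≤ a) : PySem.List.pyRange a b s = [] := by
  rw [PySem.List.pyRange_of_pos _ _ hs]
  simp [show ¬ a < b from by omega]

theorem pvRangeCons (a b s : Int) (hs : 0 < s) (h : a < b) :
    PySem.List.pyRange a b s = a :: PySem.List.pyRange (a + s) b s := by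
  rw [PySem.List.pyRange_of_pos _ _ hs, PySem.List.pyRange_of_pos _ _ hs, if_pos h]
  by_cases h2 : a + s < b
  · rw [if_pos h2]
    have key : ((b - a + s - 1) / s).toNat = ((b - (a + s) + s - 1) / s).toNat + 1 := by
      have e1 : b - a + s - 1 = (b - (a + s) + s - 1) + 1 * s := by ring
      rw [e1, Int.add_mul_ediv_right _ _ (by omega : s ≠ 0)]
      have hq : 0 ≤ (b - (a + s) + s - 1) / s := Int.ediv_nonneg (by omega) (by omega)
      omega
    rw [key, List.range_succ_eq_map, List.map_cons, List.map_map]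
    congr 1
    · simp
    · apply List.map_congr_left
      intro x _
      simp only [Function.comp, Nat.succ_eq_add_one]
      push_cast
      ring
  · rw [if_neg h2]
    have key : (b - a + s - 1) / s = 1 := by
      rw [← PySem.Int.floordiv_eq_ediv_of_pos hs, PySem.Int.floordiv_eq_iff_of_pos hs]
      constructor
      · have : (1 : Int) * s = s := by ring
        omega
      · have : ((1 : Int) + 1) * s = s + s := by ring
        omega
    rw [key]
    norm_num

-- the while-loop collects the window lists for temp, temp+k, …, n in order
theorem pvLoopEq (nums : List Int) (k : Int) (hk : 1 ≤ k) :
    ∀ (fuel : Nat) (count temp : Int) (acc : List Int),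
      temp = k * count → 1 ≤ count →
      (nums.length : Int) < temp + (fuel : Int) * k →
      maxSubarraySumV1Loop nums (nums.length : Int) k fuel temp count acc
        = acc ++ (PySem.List.pyRange temp ((nums.length : Int) + 1) k).flatMap
            (fun m => pvWin nums m.toNat) := by
  intro fuel
  induction fuel with
  | zero =>
    intro count temp acc _ _ h3
    simp only [maxSubarraySumV1Loop]
    rw [pvRangeNil _ _ _ (by omega) (by push_cast at h3; omega)]
    simp
  | succ f ih =>
    intro count temp acc h1 h2 h3
    simp only [maxSubarraySumV1Loop]
    have htemp1 : 1 ≤ temp := by nlinarith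
    by_cases hle : temp ≤ (nums.length : Int)
    · rw [if_pos hle]
      rw [pvInnerEq nums temp htemp1 hle acc]
      have hb : (nums.length : Int) < k * (count + 1) + (f : Int) * k := by
        have hcast : ((f + 1 : Nat) : Int) * k = (f : Int) * k + k := by push_cast; ring
        rw [hcast] at h3
        nlinarith [h3, h1]
      rw [ih (count + 1) (k * (count + 1)) _ rfl (by omega) hb]
      rw [pvRangeCons temp _ k (by omega) (by omega)]
      rw [show temp + k = k * (count + 1) from by rw [h1]; ring]
      rw [List.flatMap_cons, List.append_assoc]
    · rw [if_neg hle]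
      rw [pvRangeNil _ _ _ (by omega) (by omega)]
      simp

-- ===== VERDICT (by name: the statement is the Claim_ definition above) =====
theorem maxSubarraySumV1_spec : Claim_equal_maxSubarraySumV1 := by
  intro nums k _ hpre
  obtain ⟨hk1, hk2⟩ := hpre
  show maxSubarraySumV1 nums k = maxSubarraySumV1_alt nums k
  simp only [maxSubarraySumV1, maxSubarraySumV1_alt]
  have hbound : (nums.length : Int) < k + ((nums.length + 1 : Nat) : Int) * k := by
    have h : ((nums.length + 1 : Nat) : Int) = (nums.length : Int) + 1 := by push_cast; ring
    rw [h]
    nlinarith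
  rw [pvLoopEq nums k hk1 (nums.length + 1) 1 k [] (by ring) le_rfl hbound, List.nil_append]
  have hlists : (PySem.List.pyRange k ((nums.length : Int) + 1) k).flatMap
      (fun m => (PySem.List.pyRange 0 ((nums.length : Int) - m + 1) 1).map
        (fun i =>
          (PySem.List.pyGet? (nums.foldl (fun p x => p ++ [(PySem.List.pyGet? p (-1)).getD 0 + x]) [0]) (i + m)).getD 0
          - (PySem.List.pyGet? (nums.foldl (fun p x => p ++ [(PySem.List.pyGet? p (-1)).getD 0 + x]) [0]) i).getD 0))
      = (PySem.List.pyRange k ((nums.length : Int) + 1) k).flatMap (fun m => pvWin nums m.toNat) := by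
    apply pvFlatMapCongr
    intro m hm
    rw [PySem.List.mem_pyRange_iff_of_pos (by omega)] at hm
    obtain ⟨hm1, hm2, -⟩ := hm
    obtain ⟨M, rfl⟩ : ∃ M : Nat, m = (M : Int) := ⟨m.toNat, by omega⟩
    rw [Int.toNat_natCast]
    exact pvAltInnerEq nums M (by omega)
  rw [hlists]
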